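-- pv_equiv track=rewrite | github.com/Runarok/GeeksForGeeks-solutions | Difficulty: Basic/Count number of digits after decimal/count-number-of-digits-after-decimal.py | countDecimal
-- ===== SOURCE A (Python) =====
-- def countDecimal(x, y):
--     # Initialize the count of decimal places
--     decimal_count = 0
--
--     # Dictionary to track remainders to detect repeating decimals
--     remainder_map = {}
--
--     # If x is exactly divisible by y, no decimal places
--     if x % y == 0:
--         return 0
--
--     # Process the decimal division
--     while x % y != 0:
--         x %= y  # Update x to the remainder
--         decimal_count += 1  # Increment decimal place count
--
--         # If the remainder repeats, it means the decimal is recurring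
--         if x in remainder_map:
--             return -1  # Indicating repeating decimal
--
--         # Store the remainder in the map
--         remainder_map[x] = 1
--
--         x *= 10  # Move to the next decimal place
--
--     return decimal_count  # Return the number of decimal places
-- ===== SOURCE B (Python) =====
-- def _gcd(a, b):
--     while b:
--         a, b = b, a % b
--     return a
--
--
-- def countDecimal(x, y):
--     # Number-theoretic closed form: x/y terminates iff the reduced denominator
--     # is of the form 2^a * 5^b, and then has max(a, b) decimal digits.
--     r = x % y
--     if r == 0:
--         return 0
--     d = abs(y) // _gcd(abs(r), abs(y))
--     two = 0
--     while d % 2 == 0: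
--         d //= 2
--         two += 1
--     five = 0
--     while d % 5 == 0:
--         d //= 5
--         five += 1
--     return max(two, five) if d == 1 else -1
-- ===== Notes on version B (the rewrite author's own statement) =====
-- stated objective: faster
-- what changed: Replaces the O(y) long-division simulation with a remainder dictionary by the closed-form number-theoretic test: reduce the remainder/denominator by their gcd, strip factors 2 and 5 from the reduced denominator, answer max(#2,#5) if nothing is left else -1 (O(log y)).
import Mathlib
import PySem

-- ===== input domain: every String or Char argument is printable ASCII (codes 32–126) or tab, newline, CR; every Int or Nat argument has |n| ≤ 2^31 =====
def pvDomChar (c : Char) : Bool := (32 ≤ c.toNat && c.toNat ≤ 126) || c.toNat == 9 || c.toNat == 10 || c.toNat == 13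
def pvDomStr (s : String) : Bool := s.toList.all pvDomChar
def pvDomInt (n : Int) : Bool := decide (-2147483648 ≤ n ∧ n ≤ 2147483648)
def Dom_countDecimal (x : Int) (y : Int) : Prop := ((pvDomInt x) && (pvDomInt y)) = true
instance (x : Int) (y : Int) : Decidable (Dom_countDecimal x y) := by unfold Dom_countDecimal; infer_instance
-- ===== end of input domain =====

-- B replaces A's long-division simulation by the gcd/strip-2s-and-5s closed-form test (faster).

-- ===== PORT A =====
-- the while-loop of A, as fuel recursion (fuel |y|+2 is proved sufficient; the fuel-0 branch is never reached on Pre_)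
def countDecimalLoop (y : Int) : Nat → Int → Int → PySem.Dict Int Int → Int
  | 0, _, count, _ => count
  | fuel + 1, x, count, m =>
    if PySem.Int.mod x y ≠ 0 then
      let x1 := PySem.Int.mod x y          -- x %= y
      let count1 := count + 1              -- decimal_count += 1
      if m.contains x1 then -1             -- if x in remainder_map: return -1
      else countDecimalLoop y fuel (x1 * 10) count1 (m.insert x1 1)  -- remainder_map[x] = 1; x *= 10
    else count

def countDecimal (x : Int) (y : Int) : Int :=
  if PySem.Int.mod x y = 0 then 0
  else countDecimalLoop y (y.natAbs + 2) x 0 PySem.Dict.empty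

-- ===== PORT B =====
-- _gcd(a, b): while b: a, b = b, a % b
def gcdLoop (a b : Nat) : Nat :=
  if _h : b = 0 then a else gcdLoop b (a % b)
termination_by b
decreasing_by exact Nat.mod_lt _ (Nat.pos_of_ne_zero _h)

-- while d % p == 0: d //= p; c += 1   (the '0 < d ∧ 2 ≤ p' conjuncts are totality guards only; both always hold at the call sites)
def stripLoop (p d c : Nat) : Nat × Nat :=
  if h : d % p = 0 ∧ 0 < d ∧ 2 ≤ p then stripLoop p (d / p) (c + 1) else (c, d)
termination_by d
decreasing_by exact Nat.div_lt_self h.2.1 h.2.2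

def countDecimal_alt (x : Int) (y : Int) : Int :=
  let r := PySem.Int.mod x y
  if r = 0 then 0
  else
    let d := y.natAbs / gcdLoop r.natAbs y.natAbs
    let (two, d2) := stripLoop 2 d 0
    let (five, d3) := stripLoop 5 d2 0
    if d3 = 1 then ((max two five : Nat) : Int) else -1

-- ===== PRECONDITION & SPEC =====
-- Pre_ excludes exactly y = 0, where Python's x % y raises ZeroDivisionError.
def Pre_countDecimal (x : Int) (y : Int) : Prop := y ≠ 0
instance (x : Int) (y : Int) : Decidable (Pre_countDecimal x y) := by unfold Pre_countDecimal; infer_instance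
def pvWitness_countDecimal : Int × Int := (1, 4)

def Spec_countDecimal (x : Int) (y : Int) (out : Int) : Prop := out = countDecimal_alt x y
instance (x : Int) (y : Int) (out : Int) : Decidable (Spec_countDecimal x y out) := by unfold Spec_countDecimal; infer_instance

-- ===== CLAIM (what is proved, stated in full; the proofs are below) =====
def Claim_equal_countDecimal : Prop := ∀ (x : Int) (y : Int), Dom_countDecimal x y → Pre_countDecimal x y → Spec_countDecimal x y (countDecimal x y)

-- ===== LEMMAS AND PROOFS =====

-- the remainder after k decimal steps of the long division x / y
def sRem (x y : Int) (k : Nat) : Int := PySem.Int.mod ((10 : Int) ^ k * x) y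

theorem pv_mod_congr (a b n : Int) (h : n ∣ a - b) : PySem.Int.mod a n = PySem.Int.mod b n := by
  rcases eq_or_ne n 0 with h0 | h0
  · subst h0; simp at h
    have : a = b := by omega
    rw [this]
  obtain ⟨c, hc⟩ := h
  have e1 := PySem.Int.floordiv_mul_add_mod a n
  have e2 := PySem.Int.floordiv_mul_add_mod b n
  set ma := PySem.Int.mod a n
  set mb := PySem.Int.mod b n
  have hd : ma - mb = (c - PySem.Int.floordiv a n + PySem.Int.floordiv b n) * n := by
    ring_nf; linarith [hc, e1, e2]
  rcases lt_or_gt_of_ne h0 with hneg | hpos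
  · have b1 := PySem.Int.mod_neg_bounds a (b := n) hneg
    have b2 := PySem.Int.mod_neg_bounds b (b := n) hneg
    set t := c - PySem.Int.floordiv a n + PySem.Int.floordiv b n
    rcases lt_trichotomy t 0 with ht | ht | ht
    · nlinarith
    · rw [ht, zero_mul] at hd; omega
    · nlinarith
  · have b1 := And.intro (PySem.Int.mod_nonneg a (b := n) hpos) (PySem.Int.mod_lt a (b := n) hpos)
    have b2 := And.intro (PySem.Int.mod_nonneg b (b := n) hpos) (PySem.Int.mod_lt b (b := n) hpos)
    set t := c - PySem.Int.floordiv a n + PySem.Int.floordiv b n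
    rcases lt_trichotomy t 0 with ht | ht | ht
    · nlinarith
    · rw [ht, zero_mul] at hd; omega
    · nlinarith

theorem sRem_succ (x y : Int) (k : Nat) :
    PySem.Int.mod (10 * sRem x y k) y = sRem x y (k + 1) := by
  unfold sRem
  apply pv_mod_congr
  have e := PySem.Int.floordiv_mul_add_mod ((10 : Int) ^ k * x) y
  refine ⟨-(10 * PySem.Int.floordiv ((10 : Int) ^ k * x) y), ?_⟩
  rw [pow_succ]
  nlinarith [e]

theorem sRem_shift (x y : Int) (i j : Nat) (h : sRem x y i = sRem x y j) :
    ∀ t, sRem x y (i + t) = sRem x y (j + t) := by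
  intro t
  induction t with
  | zero => simpa using h
  | succ n ih =>
    have h1 := sRem_succ x y (i + n)
    have h2 := sRem_succ x y (j + n)
    rw [ih, h2] at h1
    show sRem x y (i + n + 1) = sRem x y (j + n + 1)
    exact h1.symm

theorem gcdLoop_eq (a b : Nat) : gcdLoop a b = Nat.gcd a b := by
  induction b using Nat.strong_induction_on generalizing a with
  | _ b ih =>
    rw [gcdLoop]
    by_cases hb : b = 0
    · simp [hb]
    · rw [dif_neg hb, ih (a % b) (Nat.mod_lt _ (Nat.pos_of_ne_zero hb)) b]
      rw [Nat.gcd_comm b (a % b), ← Nat.gcd_rec b a, Nat.gcd_comm b a]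

theorem stripLoop_spec (p : Nat) (hp : 2 ≤ p) :
    ∀ d c : Nat, 0 < d → ∃ k m, stripLoop p d c = (c + k, m) ∧ d = p ^ k * m ∧ 0 < m ∧ ¬ p ∣ m := by
  intro d
  induction d using Nat.strong_induction_on with
  | _ d ih =>
    intro c hd
    rw [stripLoop]
    by_cases hdvd : d % p = 0
    · rw [dif_pos ⟨hdvd, hd, hp⟩]
      have hlt : d / p < d := Nat.div_lt_self hd hp
      have hdvd' := Nat.dvd_of_mod_eq_zero hdvd
      have hdp : 0 < d / p := Nat.div_pos (Nat.le_of_dvd hd hdvd') (by omega)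
      obtain ⟨k, m, he, hdm, hm, hnd⟩ := ih (d / p) hlt (c + 1) hdp
      refine ⟨k + 1, m, ?_, ?_, hm, hnd⟩
      · rw [he]; ring_nf
      · have hde : d = p * (d / p) := (Nat.mul_div_cancel' hdvd').symm
        rw [hde, hdm]; ring
    · rw [dif_neg (by tauto)]
      refine ⟨0, d, by simp, by simp, hd, fun hdvd2 => hdvd ?_⟩
      exact Nat.mod_eq_zero_of_dvd hdvd2

-- pigeonhole: a Nodup list of nonzero residues mod y has fewer than |y| elements
theorem pv_pigeon (y : Int) (hy : y ≠ 0) (l : List Int) (hn : l.Nodup)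
    (hb : ∀ z ∈ l, z ≠ 0 ∧ ((0 < y → 0 ≤ z ∧ z < y) ∧ (y < 0 → y < z ∧ z ≤ 0))) :
    l.length + 1 ≤ y.natAbs := by
  have hmapn : (l.map Int.natAbs).Nodup := by
    refine List.Nodup.map_on ?_ hn
    intro z1 h1 z2 h2 he
    have b1 := hb z1 h1
    have b2 := hb z2 h2
    rcases lt_or_gt_of_ne hy with hneg | hpos
    · have := b1.2.2 hneg; have := b2.2.2 hneg; omega
    · have := b1.2.1 hpos; have := b2.2.1 hpos; omega
  have hsub : (l.map Int.natAbs).toFinset ⊆ Finset.Icc 1 (y.natAbs - 1) := by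
    intro n hn2
    simp only [List.mem_toFinset, List.mem_map] at hn2
    obtain ⟨z, hz, rfl⟩ := hn2
    have b := hb z hz
    simp only [Finset.mem_Icc]
    rcases lt_or_gt_of_ne hy with hneg | hpos
    · have := b.2.2 hneg; omega
    · have := b.2.1 hpos; omega
  have hcard : (l.map Int.natAbs).toFinset.card = l.length := by
    rw [List.toFinset_card_of_nodup hmapn, List.length_map]
  have := Finset.card_le_card hsub
  rw [hcard, Nat.card_Icc] at this
  omega

theorem loopT (x y : Int) (M : Nat) (hz : ∀ k, sRem x y k = 0 ↔ M ≤ k) :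
    ∀ (fuel j : Nat) (X : Int) (m : PySem.Dict Int Int),
      PySem.Int.mod X y = sRem x y j → j ≤ M → M + 1 ≤ j + fuel →
      (∀ z ∈ m.keys, ∃ i, i < j ∧ z = sRem x y i) →
      countDecimalLoop y fuel X (j : Int) m = (M : Int) := by
  intro fuel
  induction fuel with
  | zero => intro j X m hX hjM hfuel hm; omega
  | succ fuel ih =>
    intro j X m hX hjM hfuel hm
    rcases eq_or_lt_of_le hjM with rfl | hjlt
    · -- j = M : remainder is 0, the while-condition fails, return count = j
      have h0 : PySem.Int.mod X y = 0 := by rw [hX]; exact (hz j).mpr le_rfl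
      simp [countDecimalLoop, h0]
    · -- j < M
      have hnz : PySem.Int.mod X y ≠ 0 := by
        rw [hX]; intro h; exact absurd ((hz j).mp h) (by omega)
      rw [countDecimalLoop, if_pos hnz]
      have hfresh : m.contains (PySem.Int.mod X y) = false := by
        by_contra hcon
        have : m.contains (PySem.Int.mod X y) = true := by
          cases hc : m.contains (PySem.Int.mod X y) <;> simp_all
        have hmem := (PySem.Dict.contains_iff_mem_keys _ _).mp this
        obtain ⟨i, hij, hzi⟩ := hm _ hmem
        rw [hX] at hzi
        -- sRem j = sRem i with i < j < M : shifting by M - j contradicts minimality of M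
        have := sRem_shift x y j i (by rw [hzi]) (M - j)
        have heq : sRem x y (i + (M - j)) = 0 := by
          rw [← this]
          have hjm : j + (M - j) = M := by omega
          rw [hjm]
          exact (hz M).mpr le_rfl
        have := (hz _).mp heq
        omega
      rw [if_neg (by simp [hfresh])]
      have hcast : ((j : Int) + 1) = ((j + 1 : Nat) : Int) := by push_cast; ring
      rw [hcast]
      apply ih (j + 1)
      · rw [← sRem_succ x y j, hX]; ring_nf
      · omega
      · omega
      · intro z hzk
        rw [PySem.Dict.mem_keys_insert] at hzk
        rcases hzk with rfl | hzk
        · exact ⟨j, by omega, hX⟩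
        · obtain ⟨i, hij, hzi⟩ := hm z hzk
          exact ⟨i, by omega, hzi⟩

theorem loopR (x y : Int) (hy : y ≠ 0) (hnz : ∀ k, sRem x y k ≠ 0) :
    ∀ (fuel j : Nat) (X : Int) (m : PySem.Dict Int Int),
      PySem.Int.mod X y = sRem x y j →
      m.keys = (List.range j).map (sRem x y) → m.keys.Nodup →
      y.natAbs + 2 ≤ j + fuel →
      countDecimalLoop y fuel X (j : Int) m = -1 := by
  intro fuel
  induction fuel with
  | zero =>
    intro j X m hX hkeys hnd hfuel
    -- impossible: j distinct nonzero residues force j + 1 ≤ |y|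
    exfalso
    have hlen : m.keys.length = j := by rw [hkeys, List.length_map, List.length_range]
    have := pv_pigeon y hy m.keys hnd ?_
    · omega
    · intro z hz
      rw [hkeys] at hz
      simp only [List.mem_map, List.mem_range] at hz
      obtain ⟨i, _, rfl⟩ := hz
      refine ⟨hnz i, ?_, ?_⟩
      · intro hpos
        exact ⟨PySem.Int.mod_nonneg _ hpos, PySem.Int.mod_lt _ hpos⟩
      · intro hneg
        exact PySem.Int.mod_neg_bounds _ hneg
  | succ fuel ih =>
    intro j X m hX hkeys hnd hfuel
    have hXnz : PySem.Int.mod X y ≠ 0 := by rw [hX]; exact hnz j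
    rw [countDecimalLoop, if_pos hXnz]
    by_cases hcon : m.contains (PySem.Int.mod X y)
    · rw [if_pos hcon]
    · rw [if_neg hcon]
      have hfresh : m.contains (PySem.Int.mod X y) = false := by
        cases hc : m.contains (PySem.Int.mod X y) <;> simp_all
      have hcast : ((j : Int) + 1) = ((j + 1 : Nat) : Int) := by push_cast; ring
      rw [hcast]
      apply ih (j + 1)
      · rw [← sRem_succ x y j, hX]; ring_nf
      · rw [PySem.Dict.keys_insert_of_not_contains _ _ hfresh, hkeys, hX, List.range_succ, List.map_append]
        simp
      · exact PySem.Dict.nodup_keys_insert _ _ _ hnd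
      · omega

-- N ∣ 10^k·R collapses to (N / gcd R N) ∣ 10^k
theorem pv_dvd_gcd (R N g : Nat) (hg : g = Nat.gcd R N) (hR : 0 < R) (k : Nat) :
    (N ∣ 10 ^ k * R) ↔ (N / g ∣ 10 ^ k) := by
  have hgpos : 0 < g := hg ▸ Nat.gcd_pos_of_pos_left _ hR
  have hgR : g ∣ R := hg ▸ Nat.gcd_dvd_left _ _
  have hgN : g ∣ N := hg ▸ Nat.gcd_dvd_right _ _
  have hco : (N / g).Coprime (R / g) := by
    rw [hg, Nat.coprime_comm]
    exact Nat.coprime_div_gcd_div_gcd (hg ▸ hgpos)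
  constructor
  · intro h
    have h2 : (N / g) * g ∣ (10 ^ k * (R / g)) * g := by
      rw [Nat.div_mul_cancel hgN, mul_assoc, Nat.div_mul_cancel hgR]
      exact h
    have h3 : N / g ∣ 10 ^ k * (R / g) := (Nat.mul_dvd_mul_iff_right hgpos).mp h2
    exact (Nat.Coprime.dvd_of_dvd_mul_right hco) h3
  · intro h
    calc N = (N / g) * g := (Nat.div_mul_cancel hgN).symm
    _ ∣ 10 ^ k * g := mul_dvd_mul h dvd_rfl
    _ ∣ 10 ^ k * R := mul_dvd_mul dvd_rfl hgR

-- the stripped factorization d0 = 2^a·5^b·d3 decides d0 ∣ 10^k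
theorem pv_dvd_pow25 (d0 a d2 b d3 : Nat) (h2 : d0 = 2 ^ a * d2) (h5 : d2 = 5 ^ b * d3)
    (hn2 : ¬ 2 ∣ d2) (hn5 : ¬ 5 ∣ d3) (k : Nat) :
    (d0 ∣ 10 ^ k) ↔ (d3 = 1 ∧ max a b ≤ k) := by
  have hn2' : ¬ 2 ∣ d3 := fun h => hn2 (h5 ▸ Dvd.dvd.mul_left h _)
  have hco2 : Nat.Coprime 2 d3 := (Nat.Prime.coprime_iff_not_dvd Nat.prime_two).mpr hn2'
  have hco5 : Nat.Coprime 5 d3 := (Nat.Prime.coprime_iff_not_dvd Nat.prime_five).mpr hn5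
  have hco10 : Nat.Coprime 10 d3 := by
    have h10 : (10 : Nat) = 2 * 5 := by norm_num
    rw [h10]
    exact Nat.Coprime.mul_left hco2 hco5
  have hpow : ∀ k : Nat, (10 : Nat) ^ k = 2 ^ k * 5 ^ k := fun k => by
    rw [show (10 : Nat) = 2 * 5 by norm_num, mul_pow]
  constructor
  · intro h
    have hd3dvd : d3 ∣ 10 ^ k :=
      dvd_trans (by rw [h2, h5]; exact Dvd.dvd.mul_left (Dvd.dvd.mul_left dvd_rfl _) _) h
    have hd31 : d3 = 1 := Nat.Coprime.eq_one_of_dvd (Nat.Coprime.pow_right k hco10.symm) hd3dvd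
    refine ⟨hd31, ?_⟩
    have h2d : 2 ^ a ∣ 10 ^ k := dvd_trans (by rw [h2]; exact Dvd.dvd.mul_right dvd_rfl _) h
    have h5d : 5 ^ b ∣ 10 ^ k := by
      refine dvd_trans ?_ h
      rw [h2, h5, hd31, mul_one]
      exact Dvd.dvd.mul_left dvd_rfl _
    rw [hpow k] at h2d h5d
    have hcp2 : Nat.Coprime (2 ^ a) (5 ^ k) :=
      Nat.Coprime.pow _ _ ((Nat.coprime_primes Nat.prime_two Nat.prime_five).mpr (by norm_num))
    have hcp5 : Nat.Coprime (5 ^ b) (2 ^ k) :=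
      Nat.Coprime.pow _ _ ((Nat.coprime_primes Nat.prime_five Nat.prime_two).mpr (by norm_num))
    have ha : 2 ^ a ∣ 2 ^ k := Nat.Coprime.dvd_of_dvd_mul_right hcp2 h2d
    have hb : 5 ^ b ∣ 5 ^ k := Nat.Coprime.dvd_of_dvd_mul_left hcp5 h5d
    have ha' : a ≤ k := (Nat.pow_dvd_pow_iff_le_right (by norm_num)).mp ha
    have hb' : b ≤ k := (Nat.pow_dvd_pow_iff_le_right (by norm_num)).mp hb
    omega
  · rintro ⟨hd31, hmax⟩
    rw [h2, h5, hd31, mul_one, hpow k]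
    exact mul_dvd_mul (pow_dvd_pow _ (by omega)) (pow_dvd_pow _ (by omega))

-- ===== VERDICT (by name: the statement is the Claim_ definition above) =====
theorem countDecimal_spec : Claim_equal_countDecimal := by
  intro x y _hdom hy
  unfold Spec_countDecimal countDecimal countDecimal_alt
  by_cases hr : PySem.Int.mod x y = 0
  · simp [hr]
  rw [if_neg hr, if_neg hr]
  have hNpos : 0 < y.natAbs := Int.natAbs_pos.mpr hy
  have hRpos : 0 < (PySem.Int.mod x y).natAbs := Int.natAbs_pos.mpr hr
  have hgl : gcdLoop (PySem.Int.mod x y).natAbs y.natAbs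
      = Nat.gcd (PySem.Int.mod x y).natAbs y.natAbs := gcdLoop_eq _ _
  have hgpos : 0 < Nat.gcd (PySem.Int.mod x y).natAbs y.natAbs :=
    Nat.gcd_pos_of_pos_left _ hRpos
  have hd0pos : 0 < y.natAbs / Nat.gcd (PySem.Int.mod x y).natAbs y.natAbs :=
    Nat.div_pos (Nat.le_of_dvd hNpos (Nat.gcd_dvd_right _ _)) hgpos
  obtain ⟨a, d2, e2, hda, hd2pos, hn2⟩ :=
    stripLoop_spec 2 (by norm_num) (y.natAbs / Nat.gcd (PySem.Int.mod x y).natAbs y.natAbs) 0 hd0pos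
  obtain ⟨b, d3, e5, hdb, hd3pos, hn5⟩ := stripLoop_spec 5 (by norm_num) d2 0 hd2pos
  -- reduce the B side to its closed form
  simp only [hgl, e2, e5, Nat.zero_add]
  -- the remainder after k steps vanishes iff d3 = 1 and max a b ≤ k
  have hs0 : sRem x y 0 = PySem.Int.mod x y := by simp [sRem]
  have hkey : ∀ k, sRem x y k = 0 ↔ (d3 = 1 ∧ max a b ≤ k) := by
    intro k
    have h1 : sRem x y k = 0 ↔ y ∣ (10 : Int) ^ k * x := PySem.Int.mod_eq_zero_iff_dvd _ _
    have hxr : y ∣ (10 : Int) ^ k * x - (10 : Int) ^ k * PySem.Int.mod x y := by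
      have e := PySem.Int.floordiv_mul_add_mod x y
      refine ⟨(10 : Int) ^ k * PySem.Int.floordiv x y, ?_⟩
      linear_combination (-(10 : Int) ^ k) * e
    have h2 : (y ∣ (10 : Int) ^ k * x) ↔ (y ∣ (10 : Int) ^ k * PySem.Int.mod x y) := by
      constructor
      · intro h; have := dvd_sub h hxr; simpa using this
      · intro h; have := dvd_add hxr h; simpa using this
    have h3 : (y ∣ (10 : Int) ^ k * PySem.Int.mod x y)
        ↔ (y.natAbs ∣ 10 ^ k * (PySem.Int.mod x y).natAbs) := by
      rw [← Int.natAbs_dvd_natAbs]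
      have habs : ((10 : Int) ^ k * PySem.Int.mod x y).natAbs
          = 10 ^ k * (PySem.Int.mod x y).natAbs := by
        rw [Int.natAbs_mul, Int.natAbs_pow]
        rfl
      rw [habs]
    rw [h1, h2, h3,
        pv_dvd_gcd (PySem.Int.mod x y).natAbs y.natAbs _ rfl hRpos k,
        pv_dvd_pow25 _ a d2 b d3 hda hdb hn2 hn5 k]
  by_cases hd31 : d3 = 1
  · -- terminating decimal: both sides give max a b
    rw [if_pos hd31]
    have hz : ∀ k, sRem x y k = 0 ↔ max a b ≤ k := by
      intro k; rw [hkey k]; simp [hd31]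
    -- fuel bound: max a b ≤ y.natAbs + 1
    have h2a : (2 : Nat) ^ a ∣ y.natAbs / Nat.gcd (PySem.Int.mod x y).natAbs y.natAbs := ⟨d2, hda⟩
    have h5b : (5 : Nat) ^ b ∣ y.natAbs / Nat.gcd (PySem.Int.mod x y).natAbs y.natAbs := by
      refine ⟨2 ^ a * d3, ?_⟩; rw [hda, hdb]; ring
    have hd0N : y.natAbs / Nat.gcd (PySem.Int.mod x y).natAbs y.natAbs ≤ y.natAbs :=
      Nat.div_le_self _ _
    have haN : a ≤ y.natAbs := by
      have := Nat.le_of_dvd hd0pos h2a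
      have := Nat.lt_two_pow_self (n := a)
      omega
    have hbN : b ≤ y.natAbs := by
      have h1 := Nat.le_of_dvd hd0pos h5b
      have h2 := Nat.lt_two_pow_self (n := b)
      have h3 : (2 : Nat) ^ b ≤ 5 ^ b := Nat.pow_le_pow_left (by norm_num) b
      omega
    have := loopT x y (max a b) hz (y.natAbs + 2) 0 x PySem.Dict.empty
      (by rw [hs0]) (by omega) (by omega)
      (by intro z hz2; simp [PySem.Dict.keys_empty] at hz2)
    simpa using this
  · -- repeating decimal: both sides give -1
    rw [if_neg hd31]
    have hnz : ∀ k, sRem x y k ≠ 0 := by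
      intro k h; exact hd31 ((hkey k).mp h).1
    have := loopR x y hy hnz (y.natAbs + 2) 0 x PySem.Dict.empty
      (by rw [hs0]) (by simp [PySem.Dict.keys_empty]) (by simp [PySem.Dict.keys_empty]) (by omega)
    simpa using this
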